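-- pv_equiv track=rewrite | github.com/CODE-PROJECTS-ORGANIZATION/vezbe-resenja-oop | vezbe02/zadatak9.py | generate_2d_matrix
-- ===== SOURCE A (Python) =====
-- def generate_2d_matrix(rows, columns):
--     matrix = []
--     row = []
--     for i in range(rows):
--         for j in range(columns):
--             row.append(j + i)
--         matrix.append(row)
--         row = []
--     return matrix
-- ===== SOURCE B (Python) =====
-- def generate_2d_matrix(rows, columns):
--     # rolling row: start with range(columns), shift all entries by 1 per row
--     if rows <= 0:
--         return []
--     matrix = []
--     cur = list(range(columns))
--     for _ in range(rows):
--         matrix.append(cur)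
--         cur = [x + 1 for x in cur]
--     return matrix
-- ===== Notes on version B (the rewrite author's own statement) =====
-- stated objective: alternative
-- what changed: Replaces the nested per-cell i+j computation with a rolling accumulator: the first row is list(range(columns)) and each subsequent row is obtained by adding 1 to every entry of the previous one, so there is no inner index loop recomputing j+i.
import Mathlib
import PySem

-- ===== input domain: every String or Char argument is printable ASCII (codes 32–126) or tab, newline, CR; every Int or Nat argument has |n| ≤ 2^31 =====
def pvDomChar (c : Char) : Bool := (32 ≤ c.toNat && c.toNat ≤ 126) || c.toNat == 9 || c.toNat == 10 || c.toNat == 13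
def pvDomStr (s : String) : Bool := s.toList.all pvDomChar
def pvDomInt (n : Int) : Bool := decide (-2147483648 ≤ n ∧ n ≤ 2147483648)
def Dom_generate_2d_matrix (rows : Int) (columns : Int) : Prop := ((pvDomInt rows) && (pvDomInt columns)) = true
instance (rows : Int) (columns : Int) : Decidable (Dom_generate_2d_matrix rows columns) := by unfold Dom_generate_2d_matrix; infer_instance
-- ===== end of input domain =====

-- B builds the matrix with a rolling row accumulator (first row = range(columns), then +1 per row) instead of recomputing i+j per cell (alternative decomposition).


-- ===== PORT A =====
-- matrix, row carried as a pair; inner loop appends j+i to row, outer appends row and resets it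
def generate_2d_matrix (rows : Int) (columns : Int) : List (List Int) :=
  let st :=
    (PySem.List.pyRange 0 rows 1).foldl
      (fun (st : List (List Int) × List Int) i =>
        let row := (PySem.List.pyRange 0 columns 1).foldl (fun r j => r ++ [j + i]) st.2
        (st.1 ++ [row], []))
      ([], [])
  st.1

-- ===== PORT B =====
-- matrix + rolling current row; per iteration append cur, then shift cur by 1
def generate_2d_matrix_alt (rows : Int) (columns : Int) : List (List Int) :=
  if rows ≤ 0 then [] else
  let st :=
    (PySem.List.pyRange 0 rows 1).foldl
      (fun (st : List (List Int) × List Int) _ =>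
        (st.1 ++ [st.2], st.2.map (fun x => x + 1)))
      ([], PySem.List.pyRange 0 columns 1)
  st.1

-- ===== PRECONDITION & SPEC =====
def Spec_generate_2d_matrix (rows : Int) (columns : Int) (out : List (List Int)) : Prop := out = generate_2d_matrix_alt rows columns
instance (rows : Int) (columns : Int) (out : List (List Int)) : Decidable (Spec_generate_2d_matrix rows columns out) := by unfold Spec_generate_2d_matrix; infer_instance

-- ===== CLAIM (what is proved, stated in full; the proofs are below) =====
def Claim_equal_generate_2d_matrix : Prop := ∀ (rows : Int) (columns : Int), Dom_generate_2d_matrix rows columns → Spec_generate_2d_matrix rows columns (generate_2d_matrix rows columns)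

-- ===== LEMMAS AND PROOFS =====

-- abstract view of B's rolling-row loop: the list of the next n rows starting from cur
def rowsFrom (cur : List Int) : Nat → List (List Int)
  | 0 => []
  | n + 1 => cur :: rowsFrom (cur.map (fun x => x + 1)) n

theorem foldl_append_map (l : List Int) (f : Int → Int) (acc : List Int) :
    l.foldl (fun r j => r ++ [f j]) acc = acc ++ l.map f := by
  induction l generalizing acc with
  | nil => simp
  | cons x xs ih => simp [List.foldl, ih]

theorem portA_eval (l : List Int) (columns : Int) (m : List (List Int)) :
    (l.foldl
      (fun (st : List (List Int) × List Int) i =>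
        (st.1 ++ [(PySem.List.pyRange 0 columns 1).foldl (fun r j => r ++ [j + i]) st.2], []))
      (m, [])).1
    = m ++ l.map (fun i => (PySem.List.pyRange 0 columns 1).map (fun j => j + i)) := by
  induction l generalizing m with
  | nil => simp
  | cons x xs ih =>
    simp only [List.foldl, List.map]
    rw [ih, foldl_append_map]
    simp

theorem portB_eval (l : List Int) (m : List (List Int)) (cur : List Int) :
    (l.foldl
      (fun (st : List (List Int) × List Int) _ =>
        (st.1 ++ [st.2], st.2.map (fun x => x + 1)))
      (m, cur)).1
    = m ++ rowsFrom cur l.length := by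
  induction l generalizing m cur with
  | nil => simp [rowsFrom]
  | cons x xs ih =>
    simp only [List.foldl, List.length_cons]
    rw [ih]
    simp [rowsFrom]

theorem rowsFrom_eq_map (n : Nat) (C : List Int) (a : Int) :
    rowsFrom (C.map (fun x => x + a)) n
      = (List.range n).map (fun (k : Nat) => C.map (fun x => x + (a + (k : Int)))) := by
  induction n generalizing a with
  | zero => simp [rowsFrom]
  | succ n ih =>
    have hshift : (C.map (fun x => x + a)).map (fun x => x + 1)
        = C.map (fun x => x + (a + 1)) := by
      rw [List.map_map]; congr 1; funext x; simp [Function.comp]; ring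
    rw [rowsFrom, hshift, ih, List.range_succ_eq_map, List.map_cons, List.map_map]
    congr 1
    · congr 1; funext x; push_cast; ring
    · apply List.map_congr_left
      intro k _
      simp only [Function.comp]
      congr 1; funext x; push_cast; ring

-- ===== VERDICT (by name: the statement is the Claim_ definition above) =====
theorem generate_2d_matrix_spec : Claim_equal_generate_2d_matrix := by
  intro rows columns _
  unfold Spec_generate_2d_matrix generate_2d_matrix generate_2d_matrix_alt
  by_cases h : rows ≤ 0
  · simp only [h, if_true, PySem.List.pyRange_one_eq_nil h, List.foldl_nil]
  · simp only [h, if_false]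
    rw [portA_eval, portB_eval, PySem.List.length_pyRange_one]
    have hC : PySem.List.pyRange 0 columns 1
        = (PySem.List.pyRange 0 columns 1).map (fun x => x + (0 : Int)) := by simp
    rw [hC, rowsFrom_eq_map, PySem.List.pyRange_one 0 rows, List.map_map]
    simp only [List.nil_append, Int.sub_zero]
    apply List.map_congr_left
    intro k _
    simp
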